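-- pv_equiv track=rewrite | github.com/pssachdeva/measuring_hate_speech_llms | src/mhs_llms/labels.py | _format_base_name
-- ===== SOURCE A (Python) =====
-- _TOKEN_OVERRIDES = {
--     "claude": "Claude",
--     "deepseek": "DeepSeek",
--     "gemini": "Gemini",
--     "gpt": "GPT",
--     "grok": "Grok",
--     "haiku": "Haiku",
--     "mini": "Mini",
--     "nano": "Nano",
--     "none": "None",
--     "low": "Low",
--     "medium": "Medium",
--     "high": "High",
--     "minimal": "Minimal",
--     "xhigh": "XHigh",
--     "opus": "Opus",
--     "pro": "Pro",
--     "qwen": "Qwen",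
--     "reasoning": "Reasoning",
--     "sonnet": "Sonnet",
-- }
--
-- def _format_base_name(model_name: str) -> str:
--     """Format the provider-stripped portion of a model id."""
--
--     raw_tokens = [token for token in model_name.split("-") if token]
--     combined_tokens = _combine_numeric_version_tokens(raw_tokens)
--     formatted_tokens = [_format_token(token) for token in combined_tokens]
--     if len(formatted_tokens) >= 2 and formatted_tokens[0] == "GPT":
--         return f"{formatted_tokens[0]}-{formatted_tokens[1]}" + (
--             f" {' '.join(formatted_tokens[2:])}" if len(formatted_tokens) > 2 else ""
--         )
--     return " ".join(formatted_tokens)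
--
-- def _combine_numeric_version_tokens(tokens: list[str]) -> list[str]:
--     """Merge adjacent numeric version tokens into dotted version strings."""
--
--     combined_tokens: list[str] = []
--     current_index = 0
--     while current_index < len(tokens):
--         current_token = tokens[current_index]
--         if _is_numeric_version_token(current_token):
--             version_tokens = [current_token]
--             look_ahead_index = current_index + 1
--             while look_ahead_index < len(tokens) and tokens[look_ahead_index].isdigit():
--                 version_tokens.append(tokens[look_ahead_index])
--                 look_ahead_index += 1
--             combined_tokens.append(".".join(version_tokens))
--             current_index = look_ahead_index
--             continue
--
--         combined_tokens.append(current_token)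
--         current_index += 1
--     return combined_tokens
--
-- def _is_numeric_version_token(token: str) -> bool:
--     """Return whether a token looks like one model version component."""
--
--     return any(character.isdigit() for character in token)
--
-- def _format_token(token: str) -> str:
--     """Format one token from a provider-stripped model id."""
--
--     if token in _TOKEN_OVERRIDES:
--         return _TOKEN_OVERRIDES[token]
--     if _is_numeric_version_token(token):
--         return token.upper() if token.isalpha() else token
--     return token.title()
-- ===== SOURCE B (Python) =====
-- _OVERRIDES = {
--     "claude": "Claude", "deepseek": "DeepSeek", "gemini": "Gemini",
--     "gpt": "GPT", "grok": "Grok", "haiku": "Haiku", "mini": "Mini",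
--     "nano": "Nano", "none": "None", "low": "Low", "medium": "Medium",
--     "high": "High", "minimal": "Minimal", "xhigh": "XHigh", "opus": "Opus",
--     "pro": "Pro", "qwen": "Qwen", "reasoning": "Reasoning", "sonnet": "Sonnet",
-- }
--
--
-- def _fmt(token: str) -> str:
--     if token in _OVERRIDES:
--         return _OVERRIDES[token]
--     if any(ch.isdigit() for ch in token):
--         return token
--     return token.title()
--
--
-- def _format_base_name(model_name: str) -> str:
--     """Format the provider-stripped portion of a model id (single pass)."""
--     out: list[str] = []
--     group: list[str] = []
--     for token in model_name.split("-"):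
--         if not token:
--             continue
--         if group and token.isdigit():
--             group.append(token)
--             continue
--         if group:
--             out.append(_fmt(".".join(group)))
--             group = []
--         if any(ch.isdigit() for ch in token):
--             group = [token]
--         else:
--             out.append(_fmt(token))
--     if group:
--         out.append(_fmt(".".join(group)))
--     if len(out) >= 2 and out[0] == "GPT":
--         head = out[0] + "-" + out[1]
--         return head + (" " + " ".join(out[2:]) if len(out) > 2 else "")
--     return " ".join(out)
-- ===== Notes on version B (the rewrite author's own statement) =====
-- stated objective: alternative
-- what changed: Replaced the indexed while-loop with inner look-ahead plus a separate formatting pass by a single forward fold that maintains an open version-group accumulator, formats tokens as they are emitted, skips empty tokens inline instead of pre-filtering, drops the dead token.upper() branch (a token containing a digit is never isalpha), and resolves the GPT prefix case by pattern-matching the output list. (single pass over the tokens without the intermediate combined-token list)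
import Mathlib
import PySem

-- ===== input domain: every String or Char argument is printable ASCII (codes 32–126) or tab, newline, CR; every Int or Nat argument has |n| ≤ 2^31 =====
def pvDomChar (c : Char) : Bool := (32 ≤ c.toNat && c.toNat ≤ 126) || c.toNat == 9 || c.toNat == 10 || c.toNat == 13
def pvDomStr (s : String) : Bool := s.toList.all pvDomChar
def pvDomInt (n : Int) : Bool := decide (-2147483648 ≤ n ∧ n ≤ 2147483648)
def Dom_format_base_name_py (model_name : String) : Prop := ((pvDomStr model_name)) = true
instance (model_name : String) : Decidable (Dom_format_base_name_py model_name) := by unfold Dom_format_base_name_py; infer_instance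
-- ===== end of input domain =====

-- B replaces A's indexed look-ahead merge loop + separate formatting pass by one forward fold
-- with an open-group accumulator that formats tokens as it emits them (objective: alternative).

-- shared module constant _TOKEN_OVERRIDES (same dict literal in Source A and Source B)
def pvOverrides : PySem.Dict (List Char) (List Char) := PySem.Dict.mk
  [ ("claude".toList, "Claude".toList), ("deepseek".toList, "DeepSeek".toList),
    ("gemini".toList, "Gemini".toList), ("gpt".toList, "GPT".toList),
    ("grok".toList, "Grok".toList), ("haiku".toList, "Haiku".toList),
    ("mini".toList, "Mini".toList), ("nano".toList, "Nano".toList),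
    ("none".toList, "None".toList), ("low".toList, "Low".toList),
    ("medium".toList, "Medium".toList), ("high".toList, "High".toList),
    ("minimal".toList, "Minimal".toList), ("xhigh".toList, "XHigh".toList),
    ("opus".toList, "Opus".toList), ("pro".toList, "Pro".toList),
    ("qwen".toList, "Qwen".toList), ("reasoning".toList, "Reasoning".toList),
    ("sonnet".toList, "Sonnet".toList) ]

-- hand port of Python str.title(), exact on the ASCII domain (no PySem primitive exists):
-- a letter is uppercased after a non-letter and lowercased after a letter; used by both ports.
def pvTitle (prevCased : Bool) : List Char → List Char
  | [] => []
  | c :: cs =>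
    if PySem.Chars.isalpha c then
      (if prevCased then PySem.Chars.lowerChar c else PySem.Chars.upperChar c) :: pvTitle true cs
    else c :: pvTitle false cs

-- ===== PORT A =====
-- _is_numeric_version_token
def pvHasDigitA (t : List Char) : Bool := t.any PySem.Chars.isdigit

-- _format_token
def pvFmtA (t : List Char) : List Char :=
  match pvOverrides.get? t with
  | some v => v
  | none =>
    if pvHasDigitA t then
      (if PySem.Chars.strIsalpha t then PySem.Chars.upper t else t)
    else pvTitle false t

-- _combine_numeric_version_tokens: the inner while-look-ahead is takeWhile/dropWhile
def pvCombineA : List (List Char) → List (List Char)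
  | [] => []
  | t :: rest =>
    if pvHasDigitA t then
      PySem.Chars.join ['.'] (t :: rest.takeWhile PySem.Chars.strIsdigit)
        :: pvCombineA (rest.dropWhile PySem.Chars.strIsdigit)
    else t :: pvCombineA rest
termination_by ts => ts.length
decreasing_by
  · simpa using Nat.lt_succ_of_le (rest.length_dropWhile_le _)
  · simp

def format_base_name_py (model_name : String) : String :=
  let raw := (PySem.Chars.splitOn model_name.toList ['-']).filter (· ≠ [])
  let fts := (pvCombineA raw).map pvFmtA
  if 2 ≤ fts.length ∧ fts.getD 0 [] = "GPT".toList then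
    String.ofList (fts.getD 0 [] ++ '-' :: fts.getD 1 [] ++
      (if 2 < fts.length then ' ' :: PySem.Chars.join [' '] (fts.drop 2) else []))
  else String.ofList (PySem.Chars.join [' '] fts)

-- ===== PORT B =====
-- _fmt (the dead token.upper() branch of A is gone)
def pvFmtB (t : List Char) : List Char :=
  match pvOverrides.get? t with
  | some v => v
  | none => if t.any PySem.Chars.isdigit then t else pvTitle false t

-- one step of B's single forward pass: state = (emitted output, open version group)
def pvStepB (s : List (List Char) × List (List Char)) (t : List Char) :
    List (List Char) × List (List Char) :=
  if t = [] then s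
  else if s.2 ≠ [] ∧ PySem.Chars.strIsdigit t then (s.1, s.2 ++ [t])
  else
    let out1 := if s.2 ≠ [] then s.1 ++ [pvFmtB (PySem.Chars.join ['.'] s.2)] else s.1
    if t.any PySem.Chars.isdigit then (out1, [t]) else (out1 ++ [pvFmtB t], [])

-- final flush of the open group
def pvFinishB (s : List (List Char) × List (List Char)) : List (List Char) :=
  if s.2 ≠ [] then s.1 ++ [pvFmtB (PySem.Chars.join ['.'] s.2)] else s.1

def format_base_name_py_alt (model_name : String) : String :=
  let out := pvFinishB ((PySem.Chars.splitOn model_name.toList ['-']).foldl pvStepB ([], []))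
  match out with
  | a :: b :: rest =>
    if a = "GPT".toList then
      String.ofList (a ++ '-' :: b ++
        (match rest with | [] => [] | _ => ' ' :: PySem.Chars.join [' '] rest))
    else String.ofList (PySem.Chars.join [' '] (a :: b :: rest))
  | _ => String.ofList (PySem.Chars.join [' '] out)

-- ===== PRECONDITION & SPEC =====
def Spec_format_base_name_py (model_name : String) (out : String) : Prop := out = format_base_name_py_alt model_name
instance (model_name : String) (out : String) : Decidable (Spec_format_base_name_py model_name out) := by unfold Spec_format_base_name_py; infer_instance

-- ===== CLAIM (what is proved, stated in full; the proofs are below) =====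
def Claim_equal_format_base_name_py : Prop := ∀ (model_name : String), Dom_format_base_name_py model_name → Spec_format_base_name_py model_name (format_base_name_py model_name)

-- ===== LEMMAS AND PROOFS =====

-- a token containing a digit is never all-alphabetic, so A's upper branch is dead
theorem pvIsalpha_of_isdigit (c : Char) (h : PySem.Chars.isdigit c = true) :
    PySem.Chars.isalpha c = false := by
  simp only [PySem.Chars.isdigit, PySem.Chars.isalpha, PySem.Chars.isupper, PySem.Chars.islower,
    Bool.and_eq_true, Bool.or_eq_false_iff, Bool.and_eq_false_iff, decide_eq_true_eq,
    decide_eq_false_iff_not] at *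
  exact ⟨Or.inl fun hA => absurd (le_trans hA h.2) (by decide),
         Or.inl fun ha => absurd (le_trans ha h.2) (by decide)⟩

theorem pvStrIsalpha_false (t : List Char) (h : t.any PySem.Chars.isdigit = true) :
    PySem.Chars.strIsalpha t = false := by
  simp only [List.any_eq_true] at h
  obtain ⟨c, hc, hd⟩ := h
  simp only [PySem.Chars.strIsalpha, Bool.and_eq_false_iff, List.all_eq_false]
  exact Or.inr ⟨c, hc, by simp [pvIsalpha_of_isdigit c hd]⟩

theorem pvFmt_eq (t : List Char) : pvFmtA t = pvFmtB t := by
  unfold pvFmtA pvFmtB pvHasDigitA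
  cases hov : pvOverrides.get? t with
  | some v => rfl
  | none =>
    simp only
    by_cases hd : t.any PySem.Chars.isdigit = true
    · simp [hd, pvStrIsalpha_false t hd]
    · simp [hd]

-- invariant of B's fold: it emits exactly A's combined-and-formatted tokens
theorem pvFold_inv (ts : List (List Char)) :
    ∀ (out g : List (List Char)),
      pvFinishB (ts.foldl pvStepB (out, g)) =
        if g = [] then out ++ (pvCombineA (ts.filter (· ≠ []))).map pvFmtA
        else out ++ pvFmtB (PySem.Chars.join ['.']
              (g ++ (ts.filter (· ≠ [])).takeWhile PySem.Chars.strIsdigit))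
          :: (pvCombineA ((ts.filter (· ≠ [])).dropWhile PySem.Chars.strIsdigit)).map pvFmtA := by
  induction ts with
  | nil =>
    intro out g
    by_cases hg : g = [] <;>
      simp [pvFinishB, pvCombineA, hg]
  | cons t ts ih =>
    intro out g
    by_cases ht : t = []
    · subst ht
      rw [List.foldl_cons, show pvStepB (out, g) [] = (out, g) from by simp [pvStepB], ih out g]
      simp
    · by_cases hg : g = []
      · subst hg
        by_cases hdt : t.any PySem.Chars.isdigit = true
        · -- fresh group opens on t
          rw [List.foldl_cons,
            show pvStepB (out, []) t = (out, [t]) from by simp [pvStepB, ht, hdt],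
            ih out [t]]
          simp [ht, pvCombineA, pvHasDigitA, hdt, pvFmt_eq]
        · -- plain token, emitted at once
          rw [List.foldl_cons,
            show pvStepB (out, []) t = (out ++ [pvFmtB t], []) from by simp [pvStepB, ht, hdt],
            ih (out ++ [pvFmtB t]) []]
          simp [ht, pvCombineA, pvHasDigitA, hdt, pvFmt_eq]
      · by_cases hdig : PySem.Chars.strIsdigit t = true
        · -- digit token absorbed into the open group
          rw [List.foldl_cons,
            show pvStepB (out, g) t = (out, g ++ [t]) from by simp [pvStepB, ht, hg, hdig],
            ih out (g ++ [t])]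
          simp [ht, hg, hdig]
        · -- non-digit token flushes the group first
          by_cases hdt : t.any PySem.Chars.isdigit = true
          · rw [List.foldl_cons,
              show pvStepB (out, g) t =
                  (out ++ [pvFmtB (PySem.Chars.join ['.'] g)], [t]) from by
                simp [pvStepB, ht, hg, hdig, hdt],
              ih (out ++ [pvFmtB (PySem.Chars.join ['.'] g)]) [t]]
            simp [ht, hg, hdig, pvCombineA, pvHasDigitA, hdt, pvFmt_eq]
          · rw [List.foldl_cons,
              show pvStepB (out, g) t =
                  (out ++ [pvFmtB (PySem.Chars.join ['.'] g)] ++ [pvFmtB t], []) from by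
                simp [pvStepB, ht, hg, hdig, hdt],
              ih (out ++ [pvFmtB (PySem.Chars.join ['.'] g)] ++ [pvFmtB t]) []]
            simp [ht, hg, hdig, pvCombineA, pvHasDigitA, hdt, pvFmt_eq]

theorem pvLists_eq (model_name : String) :
    pvFinishB ((PySem.Chars.splitOn model_name.toList ['-']).foldl pvStepB ([], [])) =
      (pvCombineA ((PySem.Chars.splitOn model_name.toList ['-']).filter (· ≠ []))).map pvFmtA := by
  rw [pvFold_inv]
  simp

-- ===== VERDICT (by name: the statement is the Claim_ definition above) =====
-- both final-join formulations agree on any token list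
theorem pvTail_eq (F : List (List Char)) :
    (if 2 ≤ F.length ∧ F.getD 0 [] = "GPT".toList then
      String.ofList (F.getD 0 [] ++ '-' :: F.getD 1 [] ++
        (if 2 < F.length then ' ' :: PySem.Chars.join [' '] (F.drop 2) else []))
    else String.ofList (PySem.Chars.join [' '] F)) =
    (match F with
     | a :: b :: rest =>
       if a = "GPT".toList then
         String.ofList (a ++ '-' :: b ++
           (match rest with | [] => [] | _ => ' ' :: PySem.Chars.join [' '] rest))
       else String.ofList (PySem.Chars.join [' '] (a :: b :: rest))
     | _ => String.ofList (PySem.Chars.join [' '] F)) := by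
  match F with
  | [] => simp
  | [a] => simp
  | a :: b :: rest =>
    by_cases ha : a = ['G', 'P', 'T']
    · cases rest <;> simp [ha, List.getD]
    · simp [ha, List.getD]

theorem format_base_name_py_spec : Claim_equal_format_base_name_py := by
  intro s _
  unfold Spec_format_base_name_py format_base_name_py format_base_name_py_alt
  rw [pvLists_eq]
  exact pvTail_eq _
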